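-- pv_equiv track=rewrite | github.com/pipdom/L_Algoritmusok_es_adatszerkezetek | flight.py | dfs
-- ===== SOURCE A (Python) =====
-- def dfs(node, dp, adj, n, child):
--     if node == n:  # Alapeset: az \( n \)-edik városba értünk
--         dp[node] = 1
--         return 1
--     if dp[node] != -1:  # Memoizáció
--         return dp[node]
--
--     max_len = 0
--     for v in adj[node]:
--         tmp = dfs(v, dp, adj, n, child)
--         if tmp > 0 and 1 + tmp > max_len:  # Csak akkor számoljuk, ha az \( n \)-edik csúcsból érkezünk
--             child[node] = v
--             max_len = 1 + tmp
--
--     dp[node] = max_len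
--     return dp[node]
-- ===== SOURCE B (Python) =====
-- # B: replaces the memoized recursion by Bellman-Ford-style rounds of relaxation over
-- # the memo table; return value only -- B performs none of A's in-place dp/child writes.
-- def dfs(node, dp, adj, n, child):
--     if node == n:
--         return 1
--     if dp[node] != -1:
--         return dp[node]
--     m = len(dp)
--     f = [1 if u == n else dp[u] for u in range(m)]
--     for _ in range(m):
--         for u in range(m):
--             if u != n and dp[u] == -1:
--                 best = 0
--                 for v in adj[u]:
--                     t = f[v]
--                     if t > 0 and 1 + t > best:
--                         best = 1 + t
--                 f[u] = best
--     return f[node]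
-- ===== Notes on version B (the rewrite author's own statement) =====
-- stated objective: alternative
-- what changed: Replaced the memoized recursive DFS (which mutates dp/child in place) by an iterative Bellman-Ford-style dynamic program: seed a table with the base/memo values and run len(dp) relaxation rounds over all rows, then return f[node]; return value only, B performs none of A's in-place dp/child writes.
-- outside the precondition, e.g. on dfs(-1, [-1, -1], [[1], [], [0]], 1, [0, 0]): A returns 3, B returns 1; on dfs(0, [-1, -1], [[-1], []], 1, [0, 0]): A returns 0, B returns 2; on dfs(0, [-1, -1], [[]], 5, [0, 0]): A returns 0, B raises IndexError
import Mathlib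
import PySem

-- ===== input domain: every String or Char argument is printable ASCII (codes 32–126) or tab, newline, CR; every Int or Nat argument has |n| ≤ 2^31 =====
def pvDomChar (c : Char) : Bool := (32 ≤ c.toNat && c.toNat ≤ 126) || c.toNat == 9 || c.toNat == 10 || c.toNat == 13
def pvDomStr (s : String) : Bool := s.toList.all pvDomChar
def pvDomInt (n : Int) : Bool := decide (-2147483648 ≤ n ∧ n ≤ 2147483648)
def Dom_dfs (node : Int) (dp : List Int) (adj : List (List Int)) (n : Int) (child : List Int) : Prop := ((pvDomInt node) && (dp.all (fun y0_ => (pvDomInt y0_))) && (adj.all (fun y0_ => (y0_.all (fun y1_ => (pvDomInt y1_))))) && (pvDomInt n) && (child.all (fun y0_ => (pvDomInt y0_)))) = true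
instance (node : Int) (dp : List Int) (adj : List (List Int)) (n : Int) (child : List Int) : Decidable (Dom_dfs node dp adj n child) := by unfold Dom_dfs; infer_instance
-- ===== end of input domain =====

-- B replaces the memoized recursive DFS by an iterative Bellman-Ford-style relaxation of the memo
-- table; equivalence is about the RETURN value only (A mutates dp and child in place, B does not
-- touch its arguments).

-- ===== PORT A =====
-- Literal port of A's recursive function; the mutated dp/child lists are threaded through the
-- recursion and the result triple is (return value, dp, child).  fuel only makes the recursion
-- total; under Pre_dfs fuel = dp.length + 1 is never exhausted.
def dfsA : Nat → Int → List Int → List (List Int) → Int → List Int → (Int × List Int × List Int)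
  | 0, _, dp, _, _, child => (0, dp, child)
  | fuel+1, node, dp, adj, n, child =>
    if node = n then
      (1, PySem.List.pySetD dp node 1, child)             -- dp[node] = 1; return 1
    else if PySem.List.pyGetD dp node 0 ≠ -1 then          -- memoisation
      (PySem.List.pyGetD dp node 0, dp, child)
    else
      -- for v in adj[node]: …  (state = (max_len, dp, child))
      let s := (PySem.List.pyGetD adj node []).foldl
        (fun (st : Int × List Int × List Int) v =>
          let r := dfsA fuel v st.2.1 adj n st.2.2
          if r.1 > 0 ∧ 1 + r.1 > st.1 then (1 + r.1, r.2.1, PySem.List.pySetD r.2.2 node v)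
          else (st.1, r.2.1, r.2.2))
        (0, dp, child)
      (s.1, PySem.List.pySetD s.2.1 node s.1, s.2.2)       -- dp[node] = max_len; return dp[node]

def dfs (node : Int) (dp : List Int) (adj : List (List Int)) (n : Int) (child : List Int) : Int :=
  (dfsA (dp.length + 1) node dp adj n child).1

-- ===== PORT B =====
-- inner loop of Source B: best over one adjacency row, reading the current table f
def bBest (adj : List (List Int)) (f : List Int) (u : Nat) : Int :=
  (adj.getD u []).foldl
    (fun best v =>
      let t := PySem.List.pyGetD f v 0
      if t > 0 ∧ 1 + t > best then 1 + t else best) 0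

-- one relaxation round: for u in range(m): if u != n and dp[u] == -1: f[u] = best
def bSweep (dp : List Int) (adj : List (List Int)) (n : Int) (f : List Int) : List Int :=
  (List.range dp.length).foldl
    (fun f (u : Nat) => if (↑u : Int) ≠ n ∧ dp.getD u 0 = -1 then f.set u (bBest adj f u) else f) f

-- f = [1 if u == n else dp[u] for u in range(m)]
def bInit (dp : List Int) (n : Int) : List Int :=
  (List.range dp.length).map (fun (u : Nat) => if (↑u : Int) = n then 1 else dp.getD u 0)

-- for _ in range(m): one sweep
def bTable (dp : List Int) (adj : List (List Int)) (n : Int) : List Int :=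
  (List.range dp.length).foldl (fun f _ => bSweep dp adj n f) (bInit dp n)

def dfs_alt (node : Int) (dp : List Int) (adj : List (List Int)) (n : Int) (child : List Int) : Int :=
  if node = n then 1
  else if PySem.List.pyGetD dp node 0 ≠ -1 then PySem.List.pyGetD dp node 0
  else PySem.List.pyGetD (bTable dp adj n) node 0

-- ===== PRECONDITION & SPEC =====
-- depChain u = the length of the longest chain of unmemoized dependencies starting at u (edges
-- leave only nodes w with w ≠ n and dp[w] = -1; the fuel argument merely truncates at depth m+1,
-- a chain of m+1 nodes must repeat one).  It is a shape invariant of the input graph and memo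
-- table — neither port computes it, and it carries no dp values, only chain length.  The Pre_
-- clause 'depChain (m+1) node ≤ m' says exactly that no unmemoized cycle is reachable from node,
-- i.e. that A's recursion terminates instead of raising RecursionError; B's m bounded relaxation
-- rounds return a value even on such inputs (e.g. (0, [-1,-1], [[1],[0]], 5, [0,0]) → B gives 0).
def depChain (dp : List Int) (adj : List (List Int)) (n : Int) : Nat → Nat → Nat
  | 0, _ => 0
  | f+1, u =>
    if (u : Int) = n ∨ dp.getD u 0 ≠ -1 then 0
    else 1 + (adj.getD u []).foldl (fun a v => max a (depChain dp adj n f v.toNat)) 0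

-- Pre_dfs: node is a valid (possibly negative) dp index and either A answers at once (node == n
-- is excluded there since A's dp[node] = 1 write needs the index, and memoised dp[node] ≠ -1
-- returns directly), or the recursion really runs; then Pre_ restricts to the task's natural
-- domain — one adjacency row and one child slot per city, adjacency entries valid indices
-- 0..m-1 — and to terminating recursions (unmemoized dependency chains from node of length ≤ m).
-- Outside it A either raises (IndexError / RecursionError) or its value rests on Python
-- negative-index wraparound or on malformed rows its traversal happens to skip (see cites).
def Pre_dfs (node : Int) (dp : List Int) (adj : List (List Int)) (n : Int) (child : List Int) : Prop :=
  PySem.Raise.InRange dp.length node ∧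
  (node = n ∨ PySem.List.pyGetD dp node 0 ≠ -1 ∨
    (0 ≤ node ∧ dp.length ≤ adj.length ∧ dp.length ≤ child.length ∧
      (∀ i < dp.length, ∀ v ∈ adj.getD i [], 0 ≤ v ∧ v < (dp.length : Int)) ∧
      depChain dp adj n (dp.length + 1) node.toNat ≤ dp.length))
instance (node : Int) (dp : List Int) (adj : List (List Int)) (n : Int) (child : List Int) : Decidable (Pre_dfs node dp adj n child) := by unfold Pre_dfs; infer_instance

def pvWitness_dfs : Int × List Int × List (List Int) × Int × List Int :=
  (0, [-1, -1, -1], [[1, 2], [2], []], 2, [-1, -1, -1])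

def Spec_dfs (node : Int) (dp : List Int) (adj : List (List Int)) (n : Int) (child : List Int) (out : Int) : Prop := out = dfs_alt node dp adj n child
instance (node : Int) (dp : List Int) (adj : List (List Int)) (n : Int) (child : List Int) (out : Int) : Decidable (Spec_dfs node dp adj n child out) := by unfold Spec_dfs; infer_instance

-- ===== CLAIM (what is proved, stated in full; the proofs are below) =====
def Claim_equal_dfs : Prop := ∀ (node : Int) (dp : List Int) (adj : List (List Int)) (n : Int) (child : List Int), Dom_dfs node dp adj n child → Pre_dfs node dp adj n child → Spec_dfs node dp adj n child (dfs node dp adj n child)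
-- ===== LEMMAS AND PROOFS =====

-- the fuelled value recursion the proofs relate both ports to
def valF (dp : List Int) (adj : List (List Int)) (n : Int) : Nat → Nat → Int
  | 0, _ => 0
  | f+1, u =>
    if (u : Int) = n then 1
    else if dp.getD u 0 ≠ -1 then dp.getD u 0
    else (adj.getD u []).foldl
      (fun best v =>
        if valF dp adj n f v.toNat > 0 ∧ 1 + valF dp adj n f v.toNat > best
        then 1 + valF dp adj n f v.toNat else best) 0

def valB (dp : List Int) (adj : List (List Int)) (n : Int) (u : Nat) : Int :=
  valF dp adj n (dp.length + 1) u

-- ---- generic fold lemmas ----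
theorem foldMax_init_le (g : Int → Nat) (l : List Int) :
    ∀ a : Nat, a ≤ l.foldl (fun a v => max a (g v)) a := by
  induction l with
  | nil => intro a; simp
  | cons v l ih => intro a; exact le_trans (Nat.le_max_left a (g v)) (ih _)

theorem foldMax_mem_le (g : Int → Nat) (l : List Int) :
    ∀ a : Nat, ∀ v ∈ l, g v ≤ l.foldl (fun a v => max a (g v)) a := by
  induction l with
  | nil => intro a v hv; simp at hv
  | cons w l ih =>
    intro a v hv
    rcases List.mem_cons.1 hv with h | h
    · subst h; exact le_trans (Nat.le_max_right a (g v)) (foldMax_init_le g l _)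
    · exact ih _ v h

theorem foldMax_congr (g₁ g₂ : Int → Nat) (l : List Int)
    (h : ∀ v ∈ l, g₁ v = g₂ v) :
    ∀ a : Nat, l.foldl (fun a v => max a (g₁ v)) a = l.foldl (fun a v => max a (g₂ v)) a := by
  induction l with
  | nil => intro a; rfl
  | cons w l ih =>
    intro a
    simp only [List.foldl_cons]
    rw [h w (by simp)]
    exact ih (fun v hv => h v (by simp [hv])) _

theorem foldRelax_congr (g₁ g₂ : Int → Int) (l : List Int)
    (h : ∀ v ∈ l, g₁ v = g₂ v) :
    ∀ a : Int, l.foldl (fun best v => if g₁ v > 0 ∧ 1 + g₁ v > best then 1 + g₁ v else best) a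
      = l.foldl (fun best v => if g₂ v > 0 ∧ 1 + g₂ v > best then 1 + g₂ v else best) a := by
  induction l with
  | nil => intro a; rfl
  | cons w l ih =>
    intro a
    simp only [List.foldl_cons]
    rw [h w (by simp)]
    exact ih (fun v hv => h v (by simp [hv])) _

theorem foldRelax_nonneg (g : Int → Int) (l : List Int) :
    ∀ a : Int, 0 ≤ a →
      0 ≤ l.foldl (fun best v => if g v > 0 ∧ 1 + g v > best then 1 + g v else best) a := by
  induction l with
  | nil => intro a ha; simpa using ha
  | cons w l ih =>
    intro a ha
    simp only [List.foldl_cons]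
    apply ih
    split
    · omega
    · exact ha

-- ---- depChain lemmas ----
theorem dep_inactive (dp : List Int) (adj : List (List Int)) (n : Int) (u : Nat)
    (h : (u : Int) = n ∨ dp.getD u 0 ≠ -1) : ∀ f, depChain dp adj n f u = 0 := by
  intro f
  cases f with
  | zero => rfl
  | succ f => rw [depChain, if_pos h]

theorem dep_active (dp : List Int) (adj : List (List Int)) (n : Int) (u : Nat) (f : Nat)
    (h : ¬((u : Int) = n ∨ dp.getD u 0 ≠ -1)) :
    depChain dp adj n (f+1) u
      = 1 + (adj.getD u []).foldl (fun a v => max a (depChain dp adj n f v.toNat)) 0 := by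
  rw [depChain, if_neg h]

theorem dep_stable (dp : List Int) (adj : List (List Int)) (n : Int) :
    ∀ g u, depChain dp adj n (g+1) u ≤ g →
      ∀ f, g ≤ f → depChain dp adj n f u = depChain dp adj n g u := by
  intro g
  induction g using Nat.strong_induction_on with
  | _ g ih =>
    intro u hb f hf
    by_cases hc : ((u : Int) = n ∨ dp.getD u 0 ≠ -1)
    · rw [dep_inactive dp adj n u hc f, dep_inactive dp adj n u hc g]
    · have h1 := dep_active dp adj n u g hc
      -- g ≥ 1 since the active value at fuel g+1 is ≥ 1
      obtain ⟨g', rfl⟩ : ∃ g', g = g' + 1 := by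
        refine ⟨g - 1, ?_⟩
        rw [h1] at hb
        omega
      -- children are bounded at fuel g'
      have hch : ∀ v ∈ adj.getD u [], depChain dp adj n (g'+1) v.toNat ≤ g' := by
        intro v hv
        have hle := foldMax_mem_le (fun v => depChain dp adj n (g'+1) v.toNat)
          (adj.getD u []) 0 v hv
        beta_reduce at hle
        rw [dep_active dp adj n u (g'+1) hc] at hb
        omega
      rcases Nat.eq_or_lt_of_le hf with rfl | hlt
      · rfl
      · obtain ⟨f', rfl⟩ : ∃ f', f = f' + 1 := ⟨f - 1, by omega⟩
        rw [dep_active dp adj n u f' hc, dep_active dp adj n u g' hc]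
        have := foldMax_congr (fun v => depChain dp adj n f' v.toNat)
          (fun v => depChain dp adj n g' v.toNat) (adj.getD u [])
          (fun v hv => by
            have e1 := ih g' (by omega) v.toNat (hch v hv) f' (by omega)
            exact e1) 0
        beta_reduce at this
        rw [this]

theorem dep_child_lt (dp : List Int) (adj : List (List Int)) (n : Int) (u : Nat)
    (hu : u < dp.length)
    (hact : ¬((u : Int) = n ∨ dp.getD u 0 ≠ -1))
    (hbound : depChain dp adj n (dp.length + 1) u ≤ dp.length)
    (v : Int) (hv : v ∈ adj.getD u []) :
    depChain dp adj n (dp.length + 1) v.toNat < depChain dp adj n (dp.length + 1) u := by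
  have h1 := dep_active dp adj n u dp.length hact
  have hFv := foldMax_mem_le (fun v => depChain dp adj n dp.length v.toNat)
    (adj.getD u []) 0 v hv
  beta_reduce at hFv
  obtain ⟨g, hg⟩ : ∃ g, dp.length = g + 1 := ⟨dp.length - 1, by omega⟩
  have hfold_le : depChain dp adj n dp.length v.toNat ≤ g := by
    rw [h1] at hbound
    omega
  have hvb : depChain dp adj n (g + 1) v.toNat ≤ g := by
    rw [← hg]
    exact hfold_le
  have s1 := dep_stable dp adj n g v.toNat hvb (dp.length + 1) (by omega)
  have s2 := dep_stable dp adj n g v.toNat hvb dp.length (by omega)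
  rw [h1, s1]
  omega

theorem dep_zero_inactive (dp : List Int) (adj : List (List Int)) (n : Int) (u : Nat)
    (h : depChain dp adj n (dp.length + 1) u = 0) : (u : Int) = n ∨ dp.getD u 0 ≠ -1 := by
  by_contra hc
  rw [dep_active dp adj n u dp.length hc] at h
  omega

-- ---- valF lemmas ----
theorem valF_stable (dp : List Int) (adj : List (List Int)) (n : Int)
    (hE : ∀ i < dp.length, ∀ v ∈ adj.getD i [], 0 ≤ v ∧ v < (dp.length : Int)) :
    ∀ r u, u < dp.length → r ≤ dp.length → depChain dp adj n (dp.length + 1) u ≤ r →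
      ∀ f g, r < f → r < g → valF dp adj n f u = valF dp adj n g u := by
  intro r
  induction r using Nat.strong_induction_on with
  | _ r ih =>
    intro u hu hrm hr f g hf hg
    obtain ⟨f', rfl⟩ : ∃ f', f = f' + 1 := ⟨f - 1, by omega⟩
    obtain ⟨g', rfl⟩ : ∃ g', g = g' + 1 := ⟨g - 1, by omega⟩
    simp only [valF]
    by_cases hn : (u : Int) = n
    · rw [if_pos hn, if_pos hn]
    by_cases hm : dp.getD u 0 ≠ -1
    · rw [if_neg hn, if_neg hn, if_pos hm, if_pos hm]
    rw [if_neg hn, if_neg hn, if_neg hm, if_neg hm]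
    have hact : ¬((u : Int) = n ∨ dp.getD u 0 ≠ -1) := by tauto
    exact foldRelax_congr (fun v => valF dp adj n f' v.toNat)
      (fun v => valF dp adj n g' v.toNat) (adj.getD u [])
      (fun v hv => by
        obtain ⟨hv0, hvlt⟩ := hE u hu v hv
        have hlt := dep_child_lt dp adj n u hu hact (le_trans hr hrm) v hv
        exact ih (r - 1) (by
            have h1 := dep_active dp adj n u dp.length hact
            rw [h1] at hr
            omega) v.toNat (by omega) (by omega) (by omega) f' g' (by omega) (by omega)) 0

theorem valB_ne_neg_one (dp : List Int) (adj : List (List Int)) (n : Int) (u : Nat) :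
    valB dp adj n u ≠ -1 := by
  unfold valB valF
  split
  · omega
  · split
    · assumption
    · have h0 := foldRelax_nonneg (fun v => valF dp adj n dp.length v.toNat) (adj.getD u []) 0 (le_refl 0)
      beta_reduce at h0
      omega

theorem valB_active_fix (dp : List Int) (adj : List (List Int)) (n : Int)
    (hE : ∀ i < dp.length, ∀ v ∈ adj.getD i [], 0 ≤ v ∧ v < (dp.length : Int))
    (u : Nat) (hu : u < dp.length)
    (hact : ¬((u : Int) = n ∨ dp.getD u 0 ≠ -1))
    (hbound : depChain dp adj n (dp.length + 1) u ≤ dp.length) :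
    valB dp adj n u = (adj.getD u []).foldl
      (fun best v =>
        if valB dp adj n v.toNat > 0 ∧ 1 + valB dp adj n v.toNat > best
        then 1 + valB dp adj n v.toNat else best) 0 := by
  unfold valB
  simp only [valF]
  rw [if_neg (fun h => hact (Or.inl h)), if_neg (fun h => hact (Or.inr h))]
  exact foldRelax_congr (fun v => valF dp adj n dp.length v.toNat)
    (fun v => valF dp adj n (dp.length + 1) v.toNat) (adj.getD u [])
    (fun v hv => by
      obtain ⟨hv0, hvlt⟩ := hE u hu v hv
      have hlt := dep_child_lt dp adj n u hu hact hbound v hv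
      exact valF_stable dp adj n hE (depChain dp adj n (dp.length + 1) v.toNat) v.toNat
        (by omega) (by omega) (le_refl _) dp.length (dp.length + 1) (by omega) (by omega)) 0

theorem valB_inactive (dp : List Int) (adj : List (List Int)) (n : Int) (u : Nat)
    (h : (u : Int) = n ∨ dp.getD u 0 ≠ -1) :
    valB dp adj n u = if (u : Int) = n then 1 else dp.getD u 0 := by
  unfold valB
  simp only [valF]
  by_cases hn : (u : Int) = n
  · rw [if_pos hn, if_pos hn]
  · have hm : dp.getD u 0 ≠ -1 := h.resolve_left hn
    rw [if_neg hn, if_neg hn, if_pos hm]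

-- ---- A-side evaluation ----
theorem dfsA_eval (dp : List Int) (adj : List (List Int)) (n : Int)
    (hE : ∀ i < dp.length, ∀ v ∈ adj.getD i [], 0 ≤ v ∧ v < (dp.length : Int)) :
    ∀ fuel (node : Int) (dp' child' : List Int),
      0 ≤ node → node < (dp.length : Int) →
      depChain dp adj n (dp.length + 1) node.toNat ≤ dp.length →
      depChain dp adj n (dp.length + 1) node.toNat < fuel →
      dp'.length = dp.length →
      (∀ w < dp.length, dp'.getD w 0 = dp.getD w 0 ∨
        (depChain dp adj n (dp.length + 1) w ≤ dp.length ∧ dp'.getD w 0 = valB dp adj n w)) →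
      (dfsA fuel node dp' adj n child').1 = valB dp adj n node.toNat ∧
      (dfsA fuel node dp' adj n child').2.1.length = dp.length ∧
      (∀ w < dp.length, (dfsA fuel node dp' adj n child').2.1.getD w 0 = dp.getD w 0 ∨
        (depChain dp adj n (dp.length + 1) w ≤ dp.length ∧
          (dfsA fuel node dp' adj n child').2.1.getD w 0 = valB dp adj n w)) := by
  intro fuel
  induction fuel with
  | zero => intro node dp' child' h0 h1 hb hfu hlen hinv; omega
  | succ fuel ih =>
    intro node dp' child' h0 h1 hb hfu hlen hinv
    have hk : node.toNat < dp.length := by omega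
    have hnode : node = (node.toNat : Int) := by omega
    rw [dfsA]
    by_cases hn : node = n
    · simp only [if_pos hn]
      have hFv : valB dp adj n node.toNat = 1 := by
        rw [valB_inactive dp adj n node.toNat (Or.inl (by rw [← hnode]; exact hn))]
        rw [if_pos (by rw [← hnode]; exact hn)]
      refine ⟨hFv.symm, ?_, ?_⟩
      · rw [PySem.List.pySetD_of_nonneg _ _ h0]; simp [hlen]
      · intro w hw
        rw [PySem.List.pySetD_of_nonneg _ _ h0]
        by_cases hwk : w = node.toNat
        · subst hwk
          refine Or.inr ⟨?_, ?_⟩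
          · rw [dep_inactive dp adj n node.toNat (Or.inl (by rw [← hnode]; exact hn))]; omega
          · rw [List.getD_eq_getElem?_getD, List.getElem?_set_self (by omega), hFv]; rfl
        · rw [List.getD_eq_getElem?_getD, List.getElem?_set_ne (by omega),
              ← List.getD_eq_getElem?_getD]
          exact hinv w hw
    · simp only [if_neg hn]
      have hcur : PySem.List.pyGetD dp' node 0 = dp'.getD node.toNat 0 := by
        rw [PySem.List.pyGetD_eq_getElem _ _ h0 (by omega)]
        rw [List.getD_eq_getElem?_getD, List.getElem?_eq_getElem (by omega)]
        rfl
      by_cases hmemo : PySem.List.pyGetD dp' node 0 ≠ -1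
      · -- memoised
        simp only [if_pos hmemo]
        refine ⟨?_, hlen, hinv⟩
        rcases hinv node.toNat hk with h | h
        · rw [hcur, h]
          rw [valB_inactive dp adj n node.toNat (Or.inr (by rw [hcur, h] at hmemo; exact hmemo))]
          rw [if_neg (by rw [← hnode]; exact hn)]
        · rw [hcur, h.2]
      · -- compute branch
        simp only [if_neg hmemo]
        have hcur' : dp'.getD node.toNat 0 = -1 := by rw [← hcur]; omega
        have hdp0 : dp.getD node.toNat 0 = -1 := by
          rcases hinv node.toNat hk with h | h
          · omega
          · exact absurd (by omega : valB dp adj n node.toNat = -1)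
              (valB_ne_neg_one dp adj n node.toNat)
        have hact : ¬((node.toNat : Int) = n ∨ dp.getD node.toNat 0 ≠ -1) := by
          rintro (h | h)
          · exact hn (by rw [hnode]; exact h)
          · exact h hdp0
        have hadj : PySem.List.pyGetD adj node [] = adj.getD node.toNat [] := by
          conv_lhs => rw [hnode]
          rw [PySem.List.pyGetD_natCast]
        have hfold : ∀ (l : List Int), (∀ v ∈ l, v ∈ adj.getD node.toNat []) →
            ∀ (ml : Int) (d c : List Int), d.length = dp.length →
            (∀ w < dp.length, d.getD w 0 = dp.getD w 0 ∨
              (depChain dp adj n (dp.length + 1) w ≤ dp.length ∧ d.getD w 0 = valB dp adj n w)) →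
            (l.foldl (fun (st : Int × List Int × List Int) v =>
               let r := dfsA fuel v st.2.1 adj n st.2.2
               if r.1 > 0 ∧ 1 + r.1 > st.1 then (1 + r.1, r.2.1, PySem.List.pySetD r.2.2 node v)
               else (st.1, r.2.1, r.2.2)) (ml, d, c)).1
              = l.foldl (fun best v =>
                  if valB dp adj n v.toNat > 0 ∧ 1 + valB dp adj n v.toNat > best
                  then 1 + valB dp adj n v.toNat else best) ml ∧
            (l.foldl (fun (st : Int × List Int × List Int) v =>
               let r := dfsA fuel v st.2.1 adj n st.2.2
               if r.1 > 0 ∧ 1 + r.1 > st.1 then (1 + r.1, r.2.1, PySem.List.pySetD r.2.2 node v)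
               else (st.1, r.2.1, r.2.2)) (ml, d, c)).2.1.length = dp.length ∧
            (∀ w < dp.length,
              (l.foldl (fun (st : Int × List Int × List Int) v =>
                 let r := dfsA fuel v st.2.1 adj n st.2.2
                 if r.1 > 0 ∧ 1 + r.1 > st.1 then (1 + r.1, r.2.1, PySem.List.pySetD r.2.2 node v)
                 else (st.1, r.2.1, r.2.2)) (ml, d, c)).2.1.getD w 0 = dp.getD w 0 ∨
              (depChain dp adj n (dp.length + 1) w ≤ dp.length ∧
                (l.foldl (fun (st : Int × List Int × List Int) v =>
                   let r := dfsA fuel v st.2.1 adj n st.2.2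
                   if r.1 > 0 ∧ 1 + r.1 > st.1 then (1 + r.1, r.2.1, PySem.List.pySetD r.2.2 node v)
                   else (st.1, r.2.1, r.2.2)) (ml, d, c)).2.1.getD w 0
                  = valB dp adj n w)) := by
          intro l
          induction l with
          | nil => intro _ ml d c hd hdi; exact ⟨rfl, hd, hdi⟩
          | cons v l ihl =>
            intro hvl ml d c hd hdi
            have hvadj : v ∈ adj.getD node.toNat [] := hvl v (by simp)
            obtain ⟨hv0, hvlt⟩ := hE node.toNat hk v hvadj
            have hrankv := dep_child_lt dp adj n node.toNat hk hact hb v hvadj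
            have hrec := ih v d c hv0 hvlt (by omega) (by omega) hd hdi
            simp only [List.foldl_cons]
            rw [hrec.1]
            split
            · exact ihl (fun x hx => hvl x (by simp [hx])) _ _ _ hrec.2.1 hrec.2.2
            · exact ihl (fun x hx => hvl x (by simp [hx])) _ _ _ hrec.2.1 hrec.2.2
        have hvl : ∀ v ∈ PySem.List.pyGetD adj node [], v ∈ adj.getD node.toNat [] := by
          rw [hadj]; exact fun v h => h
        have hres := hfold _ hvl 0 dp' child' hlen hinv
        have hFv : valB dp adj n node.toNat
            = (PySem.List.pyGetD adj node []).foldl (fun best v =>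
                if valB dp adj n v.toNat > 0 ∧ 1 + valB dp adj n v.toNat > best
                then 1 + valB dp adj n v.toNat else best) 0 := by
          rw [valB_active_fix dp adj n hE node.toNat hk hact hb, hadj]
        refine ⟨?_, ?_, ?_⟩
        · rw [hres.1, ← hFv]
        · rw [PySem.List.pySetD_of_nonneg _ _ h0]; simp [hres.2.1]
        · intro w hw
          rw [PySem.List.pySetD_of_nonneg _ _ h0]
          by_cases hwk : w = node.toNat
          · subst hwk
            refine Or.inr ⟨hb, ?_⟩
            rw [List.getD_eq_getElem?_getD, List.getElem?_set_self (by rw [hres.2.1]; exact hk)]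
            rw [Option.getD_some, hres.1, ← hFv]
          · rw [List.getD_eq_getElem?_getD, List.getElem?_set_ne (by omega),
                ← List.getD_eq_getElem?_getD]
            exact hres.2.2 w hw

-- ---- B-side helper lemmas ----
theorem bInit_length (dp : List Int) (n : Int) : (bInit dp n).length = dp.length := by
  simp [bInit]

theorem bInit_getD (dp : List Int) (n : Int) (w : Nat) (hw : w < dp.length) :
    (bInit dp n).getD w 0 = if (w : Int) = n then 1 else dp.getD w 0 := by
  unfold bInit
  rw [List.getD_eq_getElem?_getD, List.getElem?_map, List.getElem?_range hw]
  rfl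

theorem bBest_correct (dp : List Int) (adj : List (List Int)) (n : Int)
    (hE : ∀ i < dp.length, ∀ v ∈ adj.getD i [], 0 ≤ v ∧ v < (dp.length : Int))
    (u : Nat) (hu : u < dp.length)
    (hact : ¬((u : Int) = n ∨ dp.getD u 0 ≠ -1))
    (hb : depChain dp adj n (dp.length + 1) u ≤ dp.length)
    (f : List Int) (hlen : f.length = dp.length)
    (hch : ∀ v ∈ adj.getD u [], f.getD v.toNat 0 = valB dp adj n v.toNat) :
    bBest adj f u = valB dp adj n u := by
  rw [valB_active_fix dp adj n hE u hu hact hb]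
  exact foldRelax_congr (fun v => PySem.List.pyGetD f v 0)
    (fun v => valB dp adj n v.toNat) (adj.getD u [])
    (fun v hv => by
      show PySem.List.pyGetD f v 0 = valB dp adj n v.toNat
      obtain ⟨hv0, hvlt⟩ := hE u hu v hv
      have h := hch v hv
      rw [List.getD_eq_getElem?_getD,
          List.getElem?_eq_getElem (show v.toNat < f.length by omega)] at h
      rw [PySem.List.pyGetD_eq_getElem _ _ hv0 (by omega : v < (f.length : Int))]
      simpa using h) 0

-- one sweep, over an arbitrary worklist of row indices
theorem bSweep_aux (dp : List Int) (adj : List (List Int)) (n : Int)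
    (hE : ∀ i < dp.length, ∀ v ∈ adj.getD i [], 0 ≤ v ∧ v < (dp.length : Int)) (k : Nat) :
    ∀ (l : List Nat), (∀ u ∈ l, u < dp.length) →
    ∀ f : List Int, f.length = dp.length →
    (∀ w < dp.length, depChain dp adj n (dp.length + 1) w ≤ dp.length →
      depChain dp adj n (dp.length + 1) w ≤ k → f.getD w 0 = valB dp adj n w) →
    (l.foldl (fun f (u : Nat) =>
        if (↑u : Int) ≠ n ∧ dp.getD u 0 = -1 then f.set u (bBest adj f u) else f) f).length
        = dp.length ∧
    (∀ w < dp.length, depChain dp adj n (dp.length + 1) w ≤ dp.length →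
      depChain dp adj n (dp.length + 1) w ≤ k →
      (l.foldl (fun f (u : Nat) =>
        if (↑u : Int) ≠ n ∧ dp.getD u 0 = -1 then f.set u (bBest adj f u) else f) f).getD w 0
        = valB dp adj n w) ∧
    (∀ w < dp.length, depChain dp adj n (dp.length + 1) w ≤ dp.length →
      depChain dp adj n (dp.length + 1) w ≤ k + 1 →
      (f.getD w 0 = valB dp adj n w ∨ w ∈ l) →
      (l.foldl (fun f (u : Nat) =>
        if (↑u : Int) ≠ n ∧ dp.getD u 0 = -1 then f.set u (bBest adj f u) else f) f).getD w 0
        = valB dp adj n w) := by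
  intro l
  induction l with
  | nil =>
    intro _ f hflen hP
    refine ⟨hflen, hP, fun w hw hwm hwk h => ?_⟩
    rcases h with h | h
    · exact h
    · simp at h
  | cons u l ihl =>
    intro hul f hflen hP
    have hu : u < dp.length := hul u (by simp)
    -- the updated table after processing u
    by_cases hcond : ((↑u : Int) ≠ n ∧ dp.getD u 0 = -1)
    · have hact : ¬((u : Int) = n ∨ dp.getD u 0 ≠ -1) := by tauto
      -- children of u that matter are strictly smaller in depChain
      have hchild : depChain dp adj n (dp.length + 1) u ≤ dp.length →
          depChain dp adj n (dp.length + 1) u ≤ k + 1 →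
          (f.set u (bBest adj f u)).getD u 0 = valB dp adj n u := by
        intro hum huk
        have hbb : bBest adj f u = valB dp adj n u := by
          refine bBest_correct dp adj n hE u hu hact hum f hflen (fun v hv => ?_)
          obtain ⟨hv0, hvlt⟩ := hE u hu v hv
          have hlt := dep_child_lt dp adj n u hu hact hum v hv
          exact hP v.toNat (by omega) (by omega) (by omega)
        rw [List.getD_eq_getElem?_getD, List.getElem?_set_self (by omega), hbb]
        rfl
      have hset_ne : ∀ w, w ≠ u → (f.set u (bBest adj f u)).getD w 0 = f.getD w 0 := by
        intro w hwne
        rw [List.getD_eq_getElem?_getD, List.getElem?_set_ne (by omega),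
            ← List.getD_eq_getElem?_getD]
      have hP1 : ∀ w < dp.length, depChain dp adj n (dp.length + 1) w ≤ dp.length →
          depChain dp adj n (dp.length + 1) w ≤ k →
          (f.set u (bBest adj f u)).getD w 0 = valB dp adj n w := by
        intro w hw hwm hwk
        by_cases hwu : w = u
        · subst hwu; exact hchild hwm (by omega)
        · rw [hset_ne w hwu]; exact hP w hw hwm hwk
      have hrec := ihl (fun x hx => hul x (by simp [hx]))
        (f.set u (bBest adj f u)) (by simp [hflen]) hP1
      simp only [List.foldl_cons, if_pos hcond]
      refine ⟨hrec.1, hrec.2.1, fun w hw hwm hwk h => ?_⟩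
      refine hrec.2.2 w hw hwm hwk ?_
      rcases h with h | h
      · left
        by_cases hwu : w = u
        · subst hwu; exact hchild hwm hwk
        · rw [hset_ne w hwu]; exact h
      · rcases List.mem_cons.1 h with h | h
        · subst h; exact Or.inl (hchild hwm hwk)
        · exact Or.inr h
    · -- row not updated: it is inactive, so its initial value is already correct
      have hia : (u : Int) = n ∨ dp.getD u 0 ≠ -1 := by tauto
      have hrec := ihl (fun x hx => hul x (by simp [hx])) f hflen hP
      simp only [List.foldl_cons, if_neg hcond]
      refine ⟨hrec.1, hrec.2.1, fun w hw hwm hwk h => ?_⟩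
      refine hrec.2.2 w hw hwm hwk ?_
      rcases h with h | h
      · exact Or.inl h
      · rcases List.mem_cons.1 h with h | h
        · subst h
          left
          have h0 : depChain dp adj n (dp.length + 1) w = 0 := dep_inactive dp adj n w hia _
          rw [valB_inactive dp adj n w hia]
          have := hP w hw (by omega) (by omega)
          rw [valB_inactive dp adj n w hia] at this
          exact this
        · exact Or.inr h

theorem bRounds (dp : List Int) (adj : List (List Int)) (n : Int)
    (hE : ∀ i < dp.length, ∀ v ∈ adj.getD i [], 0 ≤ v ∧ v < (dp.length : Int)) :
    ∀ (l : List Nat) (k : Nat) (f : List Int), f.length = dp.length →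
    (∀ w < dp.length, depChain dp adj n (dp.length + 1) w ≤ dp.length →
      depChain dp adj n (dp.length + 1) w ≤ k → f.getD w 0 = valB dp adj n w) →
    (l.foldl (fun f _ => bSweep dp adj n f) f).length = dp.length ∧
    (∀ w < dp.length, depChain dp adj n (dp.length + 1) w ≤ dp.length →
      depChain dp adj n (dp.length + 1) w ≤ k + l.length →
      (l.foldl (fun f _ => bSweep dp adj n f) f).getD w 0 = valB dp adj n w) := by
  intro l
  induction l with
  | nil =>
    intro k f hflen hP
    exact ⟨hflen, fun w hw hwm hwk => hP w hw hwm (by simpa using hwk)⟩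
  | cons _ l ihl =>
    intro k f hflen hP
    have hsw := bSweep_aux dp adj n hE k (List.range dp.length)
      (fun u hu => List.mem_range.1 hu) f hflen hP
    have hrec := ihl (k + 1) (bSweep dp adj n f) hsw.1
      (fun w hw hwm hwk => hsw.2.2 w hw hwm hwk (Or.inr (List.mem_range.2 hw)))
    simp only [List.foldl_cons]
    refine ⟨hrec.1, fun w hw hwm hwk => hrec.2 w hw hwm (by simp at hwk ⊢; omega)⟩

-- ---- B-side evaluation ----
theorem bTable_eval (dp : List Int) (adj : List (List Int)) (n : Int)
    (hE : ∀ i < dp.length, ∀ v ∈ adj.getD i [], 0 ≤ v ∧ v < (dp.length : Int)) :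
    (bTable dp adj n).length = dp.length ∧
    (∀ w < dp.length, depChain dp adj n (dp.length + 1) w ≤ dp.length →
      (bTable dp adj n).getD w 0 = valB dp adj n w) := by
  obtain ⟨hlen, hP⟩ := bRounds dp adj n hE (List.range dp.length) 0 (bInit dp n)
    (bInit_length dp n)
    (fun w hw hwm hw0 => by
      rw [bInit_getD dp n w hw]
      exact (valB_inactive dp adj n w (dep_zero_inactive dp adj n w (by omega))).symm)
  refine ⟨hlen, fun w hw hwm => ?_⟩
  exact hP w hw hwm (by simpa using hwm)

-- ===== VERDICT (by name: the statements are the Claim_ definitions above) =====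
theorem dfs_spec : Claim_equal_dfs := by
  intro node dp adj n child _ hpre
  obtain ⟨hrange, hcase⟩ := hpre
  unfold Spec_dfs dfs dfs_alt
  by_cases hn : node = n
  · rw [dfsA]
    rw [if_pos hn, if_pos hn]
  · by_cases hmemo : PySem.List.pyGetD dp node 0 ≠ -1
    · rw [dfsA]
      rw [if_neg hn, if_neg hn, if_pos hmemo, if_pos hmemo]
    · rw [if_neg hn, if_neg hmemo]
      rcases hcase with h | h | h
      · exact absurd h hn
      · exact absurd h hmemo
      obtain ⟨h0, _, _, hE, hdep⟩ := h
      have h1 : node < (dp.length : Int) := by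
        unfold PySem.Raise.InRange at hrange
        omega
      have hres := (dfsA_eval dp adj n hE (dp.length + 1) node dp child h0 h1 hdep
        (by omega) rfl (fun w _ => Or.inl rfl)).1
      rw [hres]
      obtain ⟨hlen, htab⟩ := bTable_eval dp adj n hE
      have hk : node.toNat < dp.length := by omega
      rw [PySem.List.pyGetD_eq_getElem _ _ h0 (by omega : node < ((bTable dp adj n).length : Int))]
      rw [← htab node.toNat hk hdep]
      rw [List.getD_eq_getElem?_getD,
          List.getElem?_eq_getElem (by omega : node.toNat < (bTable dp adj n).length)]
      rfl
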